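-- pv_equiv track=rewrite | github.com/NingAnMe/python-scripts | get_day.py | get_day
-- ===== SOURCE A (Python) =====
-- def get_day(l, activity):
--     d = {}
--
--     for x in l:
--         if x[0] not in d.keys():
--             d[x[0]] = []
--         d[x[0]].append(x[1])
--
--     d = {k: [v.count(activity), len(v)] for k, v in d.items()}
--
--     l = [[k, v[0], v[1]] for k, v in d.items()]
--
--     l = sorted(l, key=lambda x: (x[1], x[2]))
--     return l[0][0]
-- ===== SOURCE B (Python) =====
-- def get_day(l, activity):
--     keys = []
--     for x in l:
--         if x[0] not in keys:
--             keys.append(x[0])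
--     best = None
--     for k in keys:
--         c = len([x for x in l if x[0] == k and x[1] == activity])
--         t = len([x for x in l if x[0] == k])
--         if best is None or c < best[1] or (c == best[1] and t < best[2]):
--             best = (k, c, t)
--     return best[0]
-- ===== Notes on version B (the rewrite author's own statement) =====
-- stated objective: alternative
-- what changed: B uses no dict and no sort: it first collects the distinct keys in first-appearance order, then for each key rescans l to count activity matches and totals, keeping a running strictly-better lexicographic minimum so ties keep the earlier key; A groups values into per-key lists in a dict, rescans them with .count, sorts the summaries and takes element 0.
import Mathlib
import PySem

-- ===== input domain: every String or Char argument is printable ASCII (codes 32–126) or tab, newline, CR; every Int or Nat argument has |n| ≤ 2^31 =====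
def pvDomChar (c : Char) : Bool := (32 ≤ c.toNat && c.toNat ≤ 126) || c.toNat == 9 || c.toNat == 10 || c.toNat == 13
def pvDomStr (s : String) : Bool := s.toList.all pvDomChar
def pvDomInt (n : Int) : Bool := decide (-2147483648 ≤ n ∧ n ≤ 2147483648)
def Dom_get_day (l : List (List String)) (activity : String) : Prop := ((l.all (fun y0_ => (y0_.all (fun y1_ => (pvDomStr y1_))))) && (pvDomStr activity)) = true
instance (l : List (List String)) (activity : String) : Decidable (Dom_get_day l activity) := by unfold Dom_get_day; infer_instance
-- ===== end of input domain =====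

-- B drops A's dict grouping and sort: it lists the distinct keys in first-appearance order,
-- rescans l per key for the two counts, and keeps a running strictly-better lexicographic minimum.

-- ===== PORT A =====
def get_day (l : List (List String)) (activity : String) : String :=
  let d : PySem.Dict String (List String) :=
    l.foldl (fun d x =>
      let d := if d.contains (PySem.List.pyGetD x 0 "") then d
               else d.insert (PySem.List.pyGetD x 0 "") ([] : List String)
      d.modify (PySem.List.pyGetD x 0 "") [] (fun v => v ++ [PySem.List.pyGetD x 1 ""]))
      PySem.Dict.empty
  let d2 : PySem.Dict String (Int × Int) :=
    PySem.Dict.ofList (d.items.map (fun kv =>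
      (kv.1, ((PySem.List.count kv.2 activity : Int), (kv.2.length : Int)))))
  let l2 : List (String × Int × Int) := d2.items.map (fun kv => (kv.1, kv.2.1, kv.2.2))
  let ls := PySem.List.sorted2 l2 (fun x => x.2.1) (fun x => x.2.2)
  (PySem.List.pyGetD ls 0 ("", 0, 0)).1

-- ===== PORT B =====
def get_day_alt (l : List (List String)) (activity : String) : String :=
  let keys : List String :=
    l.foldl (fun ks x =>
      if ks.contains (PySem.List.pyGetD x 0 "") then ks
      else ks ++ [PySem.List.pyGetD x 0 ""]) []
  let best : Option (String × Int × Int) :=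
    keys.foldl (fun b k =>
      let c : Int := (l.filter (fun x =>
        PySem.List.pyGetD x 0 "" == k && PySem.List.pyGetD x 1 "" == activity)).length
      let t : Int := (l.filter (fun x => PySem.List.pyGetD x 0 "" == k)).length
      match b with
      | none => some (k, c, t)
      | some p => if c < p.2.1 ∨ (c = p.2.1 ∧ t < p.2.2) then some (k, c, t) else some p) none
  (best.getD ("", 0, 0)).1

-- ===== PRECONDITION & SPEC =====
-- Pre_ excludes exactly the inputs where Python A raises an IndexError: the empty list
-- (l[0] of the empty sorted result) and rows with fewer than two entries (x[1]).
def Pre_get_day (l : List (List String)) (activity : String) : Prop :=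
  l ≠ [] ∧ ∀ x ∈ l, 2 ≤ x.length
instance (l : List (List String)) (activity : String) : Decidable (Pre_get_day l activity) := by
  unfold Pre_get_day; infer_instance
def pvWitness_get_day : List (List String) × String := ([["mon", "run"], ["tue", "run"]], "run")

def Spec_get_day (l : List (List String)) (activity : String) (out : String) : Prop := out = get_day_alt l activity
instance (l : List (List String)) (activity : String) (out : String) : Decidable (Spec_get_day l activity out) := by unfold Spec_get_day; infer_instance

-- ===== CLAIM (what is proved, stated in full; the proofs are below) =====
def Claim_equal_get_day : Prop := ∀ (l : List (List String)) (activity : String), Dom_get_day l activity → Pre_get_day l activity → Spec_get_day l activity (get_day l activity)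

-- ===== LEMMAS AND PROOFS =====

-- pvF maps an A-side group (key, list of activities) to the summary (key, (count, total)).
def pvF (activity : String) (kv : String × List String) : String × Int × Int :=
  (kv.1, ((PySem.List.count kv.2 activity : Int), (kv.2.length : Int)))

-- the per-element body of A's grouping loop
def pvStepA (d : PySem.Dict String (List String)) (x : List String) :
    PySem.Dict String (List String) :=
  let d := if d.contains (PySem.List.pyGetD x 0 "") then d
           else d.insert (PySem.List.pyGetD x 0 "") ([] : List String)
  d.modify (PySem.List.pyGetD x 0 "") [] (fun v => v ++ [PySem.List.pyGetD x 1 ""])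

-- a proof-side single-pass counter loop, bridging A's groups to B's per-key counts
def pvStepB (activity : String) (b : PySem.Dict String (Int × Int)) (x : List String) :
    PySem.Dict String (Int × Int) :=
  let ct := b.getD (PySem.List.pyGetD x 0 "") (0, 0)
  b.insert (PySem.List.pyGetD x 0 "")
    (ct.1 + (if PySem.List.pyGetD x 1 "" = activity then 1 else 0), ct.2 + 1)

-- B-side names: key/value of a row, the key-collection step, the distinct keys of a prefix,
-- the per-key summary computed by rescanning, and B's two loop bodies
def pvKF (x : List String) : String := PySem.List.pyGetD x 0 ""
def pvVF (x : List String) : String := PySem.List.pyGetD x 1 ""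
def pvKeyStep (ks : List String) (x : List String) : List String :=
  if ks.contains (pvKF x) then ks else ks ++ [pvKF x]
def pvDK (pre : List (List String)) : List String := pre.foldl pvKeyStep []
def pvF2 (l : List (List String)) (activity : String) (k : String) : String × Int × Int :=
  (k, ((l.filter (fun x => pvKF x == k && pvVF x == activity)).length : Int),
      ((l.filter (fun x => pvKF x == k)).length : Int))
def pvMinStep (b : Option (String × Int × Int)) (x : String × Int × Int) :
    Option (String × Int × Int) :=
  match b with
  | none => some x
  | some m =>
      if (decide (x.2.1 < m.2.1) || !decide (m.2.1 < x.2.1) && decide (x.2.2 < m.2.2)) = true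
      then some x else some m

theorem pv_contains_map (activity : String) (its : List (String × List String)) (k : String) :
    (PySem.Dict.mk (its.map (pvF activity))).contains k
      = (PySem.Dict.mk its).contains k := by
  simp [PySem.Dict.contains, List.any_map, Function.comp_def, pvF]

theorem pv_get?_map (activity : String) (its : List (String × List String)) (k : String) :
    (PySem.Dict.mk (its.map (pvF activity))).get? k
      = ((PySem.Dict.mk its).get? k).map
          (fun v => ((PySem.List.count v activity : Int), (v.length : Int))) := by
  simp only [PySem.Dict.get?, PySem.Dict.items, List.find?_map]
  have h : ((fun p : String × Int × Int => p.1 == k) ∘ pvF activity)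
      = (fun p : String × List String => p.1 == k) := rfl
  rw [h]
  cases List.find? (fun p : String × List String => p.1 == k) its <;> simp [pvF]

theorem pv_not_contains_fst (its : List (String × List String)) (k : String)
    (hc : (PySem.Dict.mk its).contains k = false) :
    ∀ p ∈ its, ¬ p.1 = k := by
  intro p hp he
  have h2 : ∀ a b, (a, b) ∈ its → ¬ a = k := by simpa [PySem.Dict.contains] using hc
  exact h2 p.1 p.2 (by simpa using hp) he

theorem pv_count_snoc (v : List String) (w a : String) :
    (PySem.List.count (v ++ [w]) a : Int)
      = (PySem.List.count v a : Int) + (if w = a then 1 else 0) := by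
  by_cases h : w = a <;> simp [PySem.List.count, h]

theorem pv_step_rel (activity : String) (d : PySem.Dict String (List String))
    (b : PySem.Dict String (Int × Int)) (x : List String)
    (h : b.items = d.items.map (pvF activity)) :
    (pvStepB activity b x).items = (pvStepA d x).items.map (pvF activity) := by
  obtain ⟨its⟩ := d
  obtain ⟨bits⟩ := b
  simp only [PySem.Dict.items] at h
  subst h
  simp only [pvStepA, pvStepB]
  by_cases hc : (PySem.Dict.mk its).contains (PySem.List.pyGetD x 0 "") = true
  · -- key already present: both sides overwrite in place
    have hcb : (PySem.Dict.mk (its.map (pvF activity))).contains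
        (PySem.List.pyGetD x 0 "") = true := by rw [pv_contains_map]; exact hc
    rw [if_pos hc]
    simp only [PySem.Dict.modify, PySem.Dict.insert]
    rw [if_pos hc, if_pos hcb]
    simp only [PySem.Dict.items]
    rcases hfind : (PySem.Dict.mk its).get? (PySem.List.pyGetD x 0 "") with _ | v0
    · exfalso
      have hfe : List.find? (fun p : String × List String =>
          p.1 == PySem.List.pyGetD x 0 "") its = none := by
        simpa [PySem.Dict.get?, Option.map_eq_none_iff] using hfind
      obtain ⟨v, hv⟩ : ∃ v, (PySem.List.pyGetD x 0 "", v) ∈ its := by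
        simpa [PySem.Dict.contains] using hc
      have := List.find?_eq_none.mp hfe _ hv
      simp at this
    · have hgdA : (PySem.Dict.mk its).getD (PySem.List.pyGetD x 0 "") [] = v0 := by
        simp [PySem.Dict.getD, hfind]
      have hgdB : (PySem.Dict.mk (its.map (pvF activity))).getD
          (PySem.List.pyGetD x 0 "") (0, 0)
          = ((PySem.List.count v0 activity : Int), (v0.length : Int)) := by
        simp [PySem.Dict.getD, pv_get?_map activity its (PySem.List.pyGetD x 0 ""), hfind]
      rw [hgdA, hgdB, List.map_map, List.map_map]
      apply List.map_congr_left
      intro p hp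
      by_cases hpk : p.1 = PySem.List.pyGetD x 0 ""
      · simp [pvF, hpk, pv_count_snoc]
        by_cases hva : PySem.List.pyGetD x 1 "" = activity <;> simp [hva]
      · simp [pvF, hpk]
  · -- new key: both sides append a fresh entry
    have hc' : (PySem.Dict.mk its).contains (PySem.List.pyGetD x 0 "") = false := by
      cases hX : (PySem.Dict.mk its).contains (PySem.List.pyGetD x 0 "") with
      | true => exact absurd hX hc
      | false => rfl
    have hcb : (PySem.Dict.mk (its.map (pvF activity))).contains
        (PySem.List.pyGetD x 0 "") = false := by rw [pv_contains_map]; exact hc'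
    have hnotin := pv_not_contains_fst its _ hc'
    rw [if_neg hc]
    simp only [PySem.Dict.insert]
    rw [if_neg hc, if_neg (by simp [hcb])]
    simp only [PySem.Dict.modify, PySem.Dict.insert, PySem.Dict.items]
    have hcontains2 : (PySem.Dict.mk (its ++ [(PySem.List.pyGetD x 0 "", ([] : List String))])).contains
        (PySem.List.pyGetD x 0 "") = true := by
      simp [PySem.Dict.contains]
    rw [if_pos hcontains2]
    have hgd2 : (PySem.Dict.mk (its ++ [(PySem.List.pyGetD x 0 "", ([] : List String))])).getD
        (PySem.List.pyGetD x 0 "") [] = [] := by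
      simp only [PySem.Dict.getD, PySem.Dict.get?, PySem.Dict.items, List.find?_append]
      rcases hfind : List.find? (fun p : String × List String =>
          p.1 == PySem.List.pyGetD x 0 "") its with _ | p
      · simp
      · exact absurd (by simpa using List.find?_some hfind)
          (hnotin p (List.mem_of_find?_eq_some hfind))
    have hgdB : (PySem.Dict.mk (its.map (pvF activity))).getD
        (PySem.List.pyGetD x 0 "") (0, 0) = (0, 0) := by
      have hnone : (PySem.Dict.mk its).get? (PySem.List.pyGetD x 0 "") = none := by
        simp only [PySem.Dict.get?, PySem.Dict.items, Option.map_eq_none_iff]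
        exact List.find?_eq_none.mpr (fun p hp => by simpa using hnotin p hp)
      simp [PySem.Dict.getD, pv_get?_map activity its (PySem.List.pyGetD x 0 ""), hnone]
    rw [hgd2, hgdB, List.map_append, List.map_append, List.map_map]
    congr 1
    · apply List.map_congr_left
      intro p hp
      have h2 : (p.1 == PySem.List.pyGetD x 0 "") = false := by simp [hnotin p hp]
      simp only [Function.comp_apply, h2, Bool.false_eq_true, if_false]
    · have h2 : ((PySem.List.pyGetD x 0 "", ([] : List String)).1
          == PySem.List.pyGetD x 0 "") = true := by simp
      simp only [List.map_cons, List.map_nil, h2, if_pos]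
      refine congrArg (fun z => [z]) (Prod.ext rfl (Prod.ext ?_ ?_))
      · rw [pvF]
        simp only [List.nil_append]
        by_cases hva : PySem.List.pyGetD x 1 "" = activity <;>
          simp [hva, PySem.List.count]
      · simp [pvF]

theorem pv_fold_rel (activity : String) (l : List (List String))
    (d : PySem.Dict String (List String)) (b : PySem.Dict String (Int × Int))
    (h : b.items = d.items.map (pvF activity)) :
    (l.foldl (pvStepB activity) b).items
      = (l.foldl pvStepA d).items.map (pvF activity) := by
  induction l generalizing d b with
  | nil => simpa using h
  | cons x t ih => exact ih _ _ (pv_step_rel activity d b x h)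

-- pvStepA keeps the key list duplicate-free
theorem pv_stepA_nodup (d : PySem.Dict String (List String))
    (x : List String) (h : (d.items.map Prod.fst).Nodup) :
    ((pvStepA d x).items.map Prod.fst).Nodup := by
  obtain ⟨its⟩ := d
  simp only [PySem.Dict.items] at h
  simp only [pvStepA]
  by_cases hc : (PySem.Dict.mk its).contains (PySem.List.pyGetD x 0 "") = true
  · rw [if_pos hc]
    simp only [PySem.Dict.modify, PySem.Dict.insert]
    rw [if_pos hc]
    simp only [PySem.Dict.items, List.map_map]
    have hsame : (its.map (Prod.fst ∘ (fun p : String × List String =>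
        if (p.1 == PySem.List.pyGetD x 0 "") = true then
          (PySem.List.pyGetD x 0 "",
            ((PySem.Dict.mk its).getD (PySem.List.pyGetD x 0 "") []
              ++ [PySem.List.pyGetD x 1 ""])) else p)))
        = its.map Prod.fst := by
      apply List.map_congr_left
      intro p _
      by_cases hpk : p.1 = PySem.List.pyGetD x 0 "" <;> simp [hpk]
    rw [hsame]
    exact h
  · have hc' : (PySem.Dict.mk its).contains (PySem.List.pyGetD x 0 "") = false := by
      cases hX : (PySem.Dict.mk its).contains (PySem.List.pyGetD x 0 "") with
      | true => exact absurd hX hc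
      | false => rfl
    have hnotin := pv_not_contains_fst its _ hc'
    rw [if_neg hc]
    simp only [PySem.Dict.insert]
    rw [if_neg hc]
    simp only [PySem.Dict.modify, PySem.Dict.insert, PySem.Dict.items]
    have hcontains2 : (PySem.Dict.mk (its ++ [(PySem.List.pyGetD x 0 "", ([] : List String))])).contains
        (PySem.List.pyGetD x 0 "") = true := by
      simp [PySem.Dict.contains]
    rw [if_pos hcontains2]
    rw [List.map_map]
    have hsame : ((its ++ [(PySem.List.pyGetD x 0 "", ([] : List String))]).map
        (Prod.fst ∘ (fun p : String × List String =>
          if (p.1 == PySem.List.pyGetD x 0 "") = true then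
            (PySem.List.pyGetD x 0 "",
              ((PySem.Dict.mk (its ++ [(PySem.List.pyGetD x 0 "", ([] : List String))])).getD
                  (PySem.List.pyGetD x 0 "") [] ++ [PySem.List.pyGetD x 1 ""]))
          else p)))
        = (its ++ [(PySem.List.pyGetD x 0 "", ([] : List String))]).map Prod.fst := by
      apply List.map_congr_left
      intro p _
      by_cases hpk : p.1 = PySem.List.pyGetD x 0 "" <;> simp [hpk]
    rw [hsame, List.map_append]
    simp only [List.map_cons, List.map_nil, List.nodup_append]
    refine ⟨h, List.nodup_singleton _, ?_⟩
    intro a ha b hb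
    obtain ⟨p, hp, hpk⟩ := List.mem_map.mp ha
    have he : b = PySem.List.pyGetD x 0 "" := by simpa using hb
    rw [he]
    exact fun h2 => hnotin p hp (hpk.trans h2)

theorem pv_foldA_nodup (l : List (List String))
    (d : PySem.Dict String (List String)) (h : (d.items.map Prod.fst).Nodup) :
    ((l.foldl pvStepA d).items.map Prod.fst).Nodup := by
  induction l generalizing d with
  | nil => simpa using h
  | cons x t ih => exact ih _ (pv_stepA_nodup d x h)

-- Dict.update (hence ofList) of a duplicate-free association list just appends it
theorem pv_update_append {ν : Type} (ps : List (String × ν)) (d : PySem.Dict String ν)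
    (h : ((d.items ++ ps).map Prod.fst).Nodup) :
    (d.update ps).items = d.items ++ ps := by
  induction ps generalizing d with
  | nil => simp [PySem.Dict.update]
  | cons p t ih =>
      have hc : d.contains p.1 = false := by
        rw [List.map_append, List.nodup_append] at h
        rcases h with ⟨-, -, hdisj⟩
        simp only [PySem.Dict.contains]
        refine List.any_eq_false.mpr ?_
        intro q hq
        simp only [beq_iff_eq]
        intro he
        exact hdisj q.1 (List.mem_map_of_mem hq) p.1 (by simp) he
      have hins : (d.insert p.1 p.2).items = d.items ++ [p] := by
        simp [PySem.Dict.insert, hc]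
      have hstep : (d.update (p :: t)) = ((d.insert p.1 p.2).update t) := rfl
      rw [hstep, ih (d.insert p.1 p.2) (by
        rw [hins, List.append_assoc]
        simpa using h), hins, List.append_assoc]
      rfl

theorem pv_ofList_nodup {ν : Type} (ps : List (String × ν))
    (h : (ps.map Prod.fst).Nodup) : (PySem.Dict.ofList ps).items = ps := by
  have := pv_update_append ps PySem.Dict.empty (by simpa [PySem.Dict.empty] using h)
  simpa [PySem.Dict.ofList, PySem.Dict.empty] using this

-- ===== key-list lemmas =====

theorem pv_mem_keystep (acc : List String) (x : List String) (k : String) :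
    k ∈ pvKeyStep acc x ↔ k ∈ acc ∨ k = pvKF x := by
  unfold pvKeyStep
  by_cases hc : acc.contains (pvKF x) = true
  · rw [if_pos hc]
    have hm := List.contains_iff_mem.mp hc
    constructor
    · exact Or.inl
    · rintro (h | h)
      · exact h
      · exact h ▸ hm
  · rw [if_neg hc]
    simp

theorem pv_mem_foldl_keystep (pre : List (List String)) :
    ∀ (acc : List String) (k : String),
      k ∈ pre.foldl pvKeyStep acc ↔ k ∈ acc ∨ ∃ y ∈ pre, pvKF y = k := by
  induction pre with
  | nil => intro acc k; simp
  | cons x t ih =>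
      intro acc k
      rw [List.foldl_cons, ih, pv_mem_keystep]
      constructor
      · rintro ((h | h) | hex)
        · exact Or.inl h
        · exact Or.inr ⟨x, by simp, h.symm⟩
        · obtain ⟨y, hy, hk⟩ := hex
          exact Or.inr ⟨y, by simp [hy], hk⟩
      · rintro (h | ⟨y, hy, hk⟩)
        · exact Or.inl (Or.inl h)
        · rcases List.mem_cons.mp hy with he | ht
          · exact Or.inl (Or.inr (he ▸ hk).symm)
          · exact Or.inr ⟨y, ht, hk⟩

theorem pv_mem_dk (pre : List (List String)) (k : String) :
    k ∈ pvDK pre ↔ ∃ y ∈ pre, pvKF y = k := by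
  rw [pvDK, pv_mem_foldl_keystep]
  simp

theorem pv_dk_snoc (pre : List (List String)) (x : List String) :
    pvDK (pre ++ [x]) = pvKeyStep (pvDK pre) x := by
  simp [pvDK, List.foldl_append]

theorem pv_find_self (ks : List String) (k0 : String) (h : k0 ∈ ks) :
    List.find? (fun k => k == k0) ks = some k0 := by
  induction ks with
  | nil => simp at h
  | cons a t ih =>
      by_cases ha : a = k0
      · simp [List.find?_cons, ha]
      · rcases List.mem_cons.mp h with he | ht
        · exact absurd he.symm ha
        · simp [List.find?_cons, ha, ih ht]

theorem pv_contains_map_f2 (l : List (List String)) (activity : String)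
    (ks : List String) (k0 : String) :
    (PySem.Dict.mk (ks.map (pvF2 l activity))).contains k0 = ks.contains k0 := by
  simp only [PySem.Dict.contains, PySem.Dict.items, List.any_map]
  have h : ((fun p : String × Int × Int => p.1 == k0) ∘ pvF2 l activity)
      = (fun k => k == k0) := rfl
  rw [h, List.any_beq']

theorem pv_getD_map_f2 (l : List (List String)) (activity : String)
    (ks : List String) (k0 : String) (h : k0 ∈ ks) :
    (PySem.Dict.mk (ks.map (pvF2 l activity))).getD k0 (0, 0) = (pvF2 l activity k0).2 := by
  simp only [PySem.Dict.getD, PySem.Dict.get?, List.find?_map]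
  have hcomp : ((fun p : String × Int × Int => p.1 == k0) ∘ pvF2 l activity)
      = (fun k => k == k0) := rfl
  rw [hcomp, pv_find_self ks k0 h]
  rfl

theorem pv_filter_snoc_self (pre : List (List String)) (x : List String)
    (p : List String → Bool) (hp : p x = true) :
    (pre ++ [x]).filter p = pre.filter p ++ [x] := by
  simp [List.filter_append, hp]

theorem pv_filter_snoc_other (pre : List (List String)) (x : List String)
    (p : List String → Bool) (hp : p x = false) :
    (pre ++ [x]).filter p = pre.filter p := by
  simp [List.filter_append, hp]

theorem pv_master_step (activity : String) (pre : List (List String)) (x : List String) :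
    (pvStepB activity (PySem.Dict.mk ((pvDK pre).map (pvF2 pre activity))) x).items
      = (pvDK (pre ++ [x])).map (pvF2 (pre ++ [x]) activity) := by
  have hkey : PySem.List.pyGetD x 0 "" = pvKF x := rfl
  have hval : PySem.List.pyGetD x 1 "" = pvVF x := rfl
  simp only [pvStepB, hkey, hval]
  by_cases hmem : pvKF x ∈ pvDK pre
  · -- known key: the entry is overwritten in place; the key list is unchanged
    have hc : (pvDK pre).contains (pvKF x) = true := List.contains_iff_mem.mpr hmem
    have hcd : (PySem.Dict.mk ((pvDK pre).map (pvF2 pre activity))).contains (pvKF x) = true := by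
      rw [pv_contains_map_f2 pre activity]; exact hc
    have hdk : pvDK (pre ++ [x]) = pvDK pre := by
      rw [pv_dk_snoc, pvKeyStep, if_pos hc]
    simp only [PySem.Dict.insert]
    rw [if_pos hcd, pv_getD_map_f2 pre activity (pvDK pre) (pvKF x) hmem, hdk]
    simp only [PySem.Dict.items, List.map_map]
    apply List.map_congr_left
    intro k hk
    simp only [Function.comp_apply, pvF2]
    by_cases hkx : k = pvKF x
    · rw [if_pos (beq_iff_eq.mpr hkx)]
      subst hkx
      refine Prod.ext rfl (Prod.ext ?_ ?_)
      · by_cases hva : pvVF x = activity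
        · rw [pv_filter_snoc_self pre x
              (fun y => pvKF y == pvKF x && pvVF y == activity) (by simp [hva]), if_pos hva]
          dsimp only
          push_cast [List.length_append, List.length_cons, List.length_nil]
          omega
        · rw [pv_filter_snoc_other pre x
              (fun y => pvKF y == pvKF x && pvVF y == activity) (by simp [hva]), if_neg hva]
          dsimp only
          omega
      · rw [pv_filter_snoc_self pre x (fun y => pvKF y == pvKF x) (by simp)]
        dsimp only
        push_cast [List.length_append, List.length_cons, List.length_nil]
        omega
    · rw [if_neg (by simp [hkx])]
      have hxx : (pvKF x == k) = false := beq_eq_false_iff_ne.mpr (fun h => hkx h.symm)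
      rw [pv_filter_snoc_other pre x
            (fun y => pvKF y == k && pvVF y == activity) (by simp [hxx]),
          pv_filter_snoc_other pre x (fun y => pvKF y == k) hxx]
  · -- new key: both sides append a fresh entry with counts over pre equal to zero
    have hc : (pvDK pre).contains (pvKF x) = false := by
      cases hX : (pvDK pre).contains (pvKF x) with
      | true => exact absurd (List.contains_iff_mem.mp hX) hmem
      | false => rfl
    have hcd : (PySem.Dict.mk ((pvDK pre).map (pvF2 pre activity))).contains (pvKF x) = false := by
      rw [pv_contains_map_f2 pre activity]; exact hc
    have hdk : pvDK (pre ++ [x]) = pvDK pre ++ [pvKF x] := by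
      rw [pv_dk_snoc, pvKeyStep, if_neg (by rw [hc]; simp)]
    have hnotrow : ∀ y ∈ pre, (pvKF y == pvKF x) = false := by
      intro y hy
      exact beq_eq_false_iff_ne.mpr
        (fun he => hmem ((pv_mem_dk pre (pvKF x)).mpr ⟨y, hy, he⟩))
    have hgd : (PySem.Dict.mk ((pvDK pre).map (pvF2 pre activity))).getD (pvKF x) (0, 0)
        = ((0 : Int), (0 : Int)) := by
      simp only [PySem.Dict.getD, PySem.Dict.get?, List.find?_map]
      have hcomp : ((fun p : String × Int × Int => p.1 == pvKF x) ∘ pvF2 pre activity)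
          = (fun k => k == pvKF x) := rfl
      rw [hcomp]
      have hnone : List.find? (fun k => k == pvKF x) (pvDK pre) = none := by
        refine List.find?_eq_none.mpr ?_
        intro k hk
        simp only [beq_iff_eq]
        intro he
        exact hmem (he ▸ hk)
      rw [hnone]
      rfl
    rw [hgd]
    simp only [PySem.Dict.insert]
    rw [if_neg (by rw [hcd]; simp)]
    simp only [PySem.Dict.items, hdk, List.map_append]
    congr 1
    · apply List.map_congr_left
      intro k hk
      have hkx : ¬ k = pvKF x := fun he => hmem (by rw [← he]; exact hk)
      have hxx : (pvKF x == k) = false := beq_eq_false_iff_ne.mpr (fun h => hkx h.symm)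
      simp only [pvF2]
      rw [pv_filter_snoc_other pre x
            (fun y => pvKF y == k && pvVF y == activity) (by simp [hxx]),
          pv_filter_snoc_other pre x (fun y => pvKF y == k) hxx]
    · have hfz : pre.filter (fun y => pvKF y == pvKF x && pvVF y == activity) = [] := by
        refine List.filter_eq_nil_iff.mpr ?_
        intro y hy
        simp [hnotrow y hy]
      have hfz2 : pre.filter (fun y => pvKF y == pvKF x) = [] := by
        refine List.filter_eq_nil_iff.mpr ?_
        intro y hy
        simp [hnotrow y hy]
      simp only [List.map_cons, List.map_nil, pvF2]
      refine congrArg (fun z => [z]) (Prod.ext rfl (Prod.ext ?_ ?_))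
      · by_cases hva : pvVF x = activity
        · rw [pv_filter_snoc_self pre x
              (fun y => pvKF y == pvKF x && pvVF y == activity) (by simp [hva]), if_pos hva, hfz]
          simp
        · rw [pv_filter_snoc_other pre x
              (fun y => pvKF y == pvKF x && pvVF y == activity) (by simp [hva]), if_neg hva, hfz]
          simp
      · rw [pv_filter_snoc_self pre x (fun y => pvKF y == pvKF x) (by simp), hfz2]
        simp

-- the counter loop over the whole list computes exactly B's rescanning summaries
theorem pv_master (activity : String) (rest : List (List String)) :
    ∀ pre : List (List String),
      (rest.foldl (pvStepB activity) (PySem.Dict.mk ((pvDK pre).map (pvF2 pre activity)))).items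
        = (pvDK (pre ++ rest)).map (pvF2 (pre ++ rest) activity) := by
  induction rest with
  | nil => intro pre; simp
  | cons x t ih =>
      intro pre
      rw [List.foldl_cons]
      have hstep : pvStepB activity (PySem.Dict.mk ((pvDK pre).map (pvF2 pre activity))) x
          = PySem.Dict.mk ((pvDK (pre ++ [x])).map (pvF2 (pre ++ [x]) activity)) := by
        obtain ⟨its, hits⟩ : ∃ its, pvStepB activity
            (PySem.Dict.mk ((pvDK pre).map (pvF2 pre activity))) x = PySem.Dict.mk its :=
          ⟨_, rfl⟩
        rw [hits]
        have := pv_master_step activity pre x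
        rw [hits] at this
        simpa [PySem.Dict.items] using congrArg PySem.Dict.mk this
      rw [hstep, ih (pre ++ [x]), List.append_assoc]
      rfl

-- head of the stable insertion sort = first minimum, for any Boolean strict order
theorem pv_head_general {α : Type} (lt : α → α → Bool) (step : Option α → α → Option α)
    (hnone : ∀ x, step none x = some x)
    (hsome : ∀ m x, step (some m) x = if lt x m then some x else some m)
    (xs : List α) (acc : List α) :
    (xs.foldl (fun a x => PySem.List.insertBy lt x a) acc).head?
      = xs.foldl step acc.head? := by
  induction xs generalizing acc with
  | nil => rfl
  | cons x t ih =>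
      rw [List.foldl_cons, List.foldl_cons, ih]
      congr 1
      cases acc with
      | nil => rw [List.head?_nil, hnone x]; rfl
      | cons y ys =>
          rw [List.head?_cons, hsome y x]
          rw [show PySem.List.insertBy lt x (y :: ys)
              = if lt x y = true then x :: y :: ys else y :: PySem.List.insertBy lt x ys from rfl]
          by_cases hxy : lt x y = true
          · rw [if_pos hxy, if_pos hxy]
            rfl
          · rw [if_neg hxy, if_neg hxy]
            rfl

theorem pv_head_sorted2_eq_fold (xs : List (String × Int × Int)) :
    (PySem.List.sorted2 xs (fun x => x.2.1) (fun x => x.2.2)).head?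
      = xs.foldl pvMinStep none := by
  have h := pv_head_general
    (fun a b : String × Int × Int =>
      decide (a.2.1 < b.2.1) || (!decide (b.2.1 < a.2.1) && decide (a.2.2 < b.2.2)))
    pvMinStep (fun x => rfl) (fun m x => rfl) xs []
  rw [List.head?_nil] at h
  exact h

-- B's inline comparison agrees with the Boolean lexicographic test of the sort
theorem pv_bstep_eq_minstep (l : List (List String)) (activity : String)
    (b : Option (String × Int × Int)) (k : String) :
    (match b with
      | none => some (k, ((l.filter (fun x =>
          PySem.List.pyGetD x 0 "" == k && PySem.List.pyGetD x 1 "" == activity)).length : Int),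
          ((l.filter (fun x => PySem.List.pyGetD x 0 "" == k)).length : Int))
      | some p =>
          if ((l.filter (fun x =>
              PySem.List.pyGetD x 0 "" == k && PySem.List.pyGetD x 1 "" == activity)).length : Int)
                < p.2.1
              ∨ (((l.filter (fun x =>
                    PySem.List.pyGetD x 0 "" == k && PySem.List.pyGetD x 1 "" == activity)).length : Int)
                  = p.2.1
                ∧ ((l.filter (fun x => PySem.List.pyGetD x 0 "" == k)).length : Int) < p.2.2)
          then some (k, ((l.filter (fun x =>
              PySem.List.pyGetD x 0 "" == k && PySem.List.pyGetD x 1 "" == activity)).length : Int),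
              ((l.filter (fun x => PySem.List.pyGetD x 0 "" == k)).length : Int))
          else some p)
      = pvMinStep b (pvF2 l activity k) := by
  cases b with
  | none => rfl
  | some p =>
      simp only [pvMinStep, pvF2, pvKF, pvVF]
      split_ifs with h1 h2 h2 <;> first
        | rfl
        | · exfalso
            simp only [Bool.or_eq_true, Bool.and_eq_true, Bool.not_eq_eq_eq_not, Bool.not_true,
              decide_eq_true_eq, decide_eq_false_iff_not] at h2
            omega

theorem pv_map_triple_eta (xs : List (String × Int × Int)) :
    xs.map (fun kv => (kv.1, kv.2.1, kv.2.2)) = xs := by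
  simp

-- ===== VERDICT (by name: the statement is the Claim_ definition above) =====
theorem get_day_spec : Claim_equal_get_day := by
  intro l activity _ _
  -- A's side: groups → summaries (pv_fold_rel), dict rebuild is the identity (nodup keys)
  have hrel := pv_fold_rel activity l PySem.Dict.empty PySem.Dict.empty (by
    simp [PySem.Dict.empty])
  have hnodup := pv_foldA_nodup l PySem.Dict.empty (by simp [PySem.Dict.empty])
  have hmapF : ((l.foldl pvStepA PySem.Dict.empty).items.map (pvF activity)).map Prod.fst
      = (l.foldl pvStepA PySem.Dict.empty).items.map Prod.fst := by
    rw [List.map_map]; rfl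
  have hof := pv_ofList_nodup
    ((l.foldl pvStepA PySem.Dict.empty).items.map (pvF activity)) (by rw [hmapF]; exact hnodup)
  -- counter loop = B's rescanning summaries
  have hmaster : (l.foldl (pvStepB activity) PySem.Dict.empty).items
      = (pvDK l).map (pvF2 l activity) := by
    have h := pv_master activity l []
    simpa [pvDK] using h
  show (PySem.List.pyGetD
      (PySem.List.sorted2
        ((PySem.Dict.ofList
          ((l.foldl pvStepA PySem.Dict.empty).items.map (pvF activity))).items.map
            (fun kv => (kv.1, kv.2.1, kv.2.2)))
        (fun x => x.2.1) (fun x => x.2.2)) 0 ("", 0, 0)).1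
    = get_day_alt l activity
  rw [hof, pv_map_triple_eta, ← hrel, hmaster]
  have hgd : ∀ (ys : List (String × Int × Int)),
      PySem.List.pyGetD ys 0 ("", 0, 0) = ys.head?.getD ("", 0, 0) := by
    intro ys
    rw [PySem.List.pyGetD_zero]
    cases ys <;> rfl
  rw [hgd, pv_head_sorted2_eq_fold, List.foldl_map]
  show ((((pvDK l).foldl (fun b k => pvMinStep b (pvF2 l activity k)) none).getD ("", 0, 0)).1 : String)
    = get_day_alt l activity
  have hfold : (pvDK l).foldl (fun b k => pvMinStep b (pvF2 l activity k)) none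
      = (pvDK l).foldl (fun b k =>
          match b with
          | none => some (k, ((l.filter (fun x =>
              PySem.List.pyGetD x 0 "" == k && PySem.List.pyGetD x 1 "" == activity)).length : Int),
              ((l.filter (fun x => PySem.List.pyGetD x 0 "" == k)).length : Int))
          | some p =>
              if ((l.filter (fun x =>
                  PySem.List.pyGetD x 0 "" == k && PySem.List.pyGetD x 1 "" == activity)).length : Int)
                    < p.2.1
                  ∨ (((l.filter (fun x =>
                        PySem.List.pyGetD x 0 "" == k && PySem.List.pyGetD x 1 "" == activity)).length : Int)
                      = p.2.1
                    ∧ ((l.filter (fun x => PySem.List.pyGetD x 0 "" == k)).length : Int) < p.2.2)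
              then some (k, ((l.filter (fun x =>
                  PySem.List.pyGetD x 0 "" == k && PySem.List.pyGetD x 1 "" == activity)).length : Int),
                  ((l.filter (fun x => PySem.List.pyGetD x 0 "" == k)).length : Int))
              else some p) none := by
    have hfun : (fun (b : Option (String × Int × Int)) (k : String) =>
        pvMinStep b (pvF2 l activity k)) = (fun b k =>
          match b with
          | none => some (k, ((l.filter (fun x =>
              PySem.List.pyGetD x 0 "" == k && PySem.List.pyGetD x 1 "" == activity)).length : Int),
              ((l.filter (fun x => PySem.List.pyGetD x 0 "" == k)).length : Int))
          | some p =>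
              if ((l.filter (fun x =>
                  PySem.List.pyGetD x 0 "" == k && PySem.List.pyGetD x 1 "" == activity)).length : Int)
                    < p.2.1
                  ∨ (((l.filter (fun x =>
                        PySem.List.pyGetD x 0 "" == k && PySem.List.pyGetD x 1 "" == activity)).length : Int)
                      = p.2.1
                    ∧ ((l.filter (fun x => PySem.List.pyGetD x 0 "" == k)).length : Int) < p.2.2)
              then some (k, ((l.filter (fun x =>
                  PySem.List.pyGetD x 0 "" == k && PySem.List.pyGetD x 1 "" == activity)).length : Int),
                  ((l.filter (fun x => PySem.List.pyGetD x 0 "" == k)).length : Int))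
              else some p) := by
      funext b k
      exact (pv_bstep_eq_minstep l activity b k).symm
    rw [hfun]
  rw [hfold]
  rfl
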